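-- pv_equiv track=rewrite | github.com/Mohammad-Malekmahmodi/Python-Code-Quera | ballllllllllllllllllllllinnnn.py | calculate_floor
-- ===== SOURCE A (Python) =====
-- def calculate_floor(string):
--     current_floor = 0  # ما از طبقه‌ی همکف شروع می‌کنیم
--
--     for move in string:
--         if move == 'U':
--             current_floor += 1  # حرکت به طبقه‌ی بالاتر
--         elif move == 'D':
--             current_floor -= 1  # حرکت به طبقه‌ی پایین‌تر
--
--     return current_floor
-- ===== SOURCE B (Python) =====
-- def calculate_floor(string):
--     return string.count('U') - string.count('D')
-- ===== Notes on version B (the rewrite author's own statement) =====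
-- stated objective: idiomatic
-- what changed: Replaced the branch-by-branch accumulating loop with two independent counting passes combined arithmetically: string.count('U') - string.count('D').
import Mathlib
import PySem

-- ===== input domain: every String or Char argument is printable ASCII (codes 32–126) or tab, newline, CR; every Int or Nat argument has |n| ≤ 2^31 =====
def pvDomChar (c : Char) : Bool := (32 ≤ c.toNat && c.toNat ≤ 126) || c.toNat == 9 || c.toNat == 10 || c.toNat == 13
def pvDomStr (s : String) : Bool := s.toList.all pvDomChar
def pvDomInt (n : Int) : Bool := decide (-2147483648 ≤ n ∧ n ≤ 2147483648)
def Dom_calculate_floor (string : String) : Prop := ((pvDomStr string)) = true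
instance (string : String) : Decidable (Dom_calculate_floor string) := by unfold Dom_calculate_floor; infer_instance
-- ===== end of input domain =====

-- B replaces A's single accumulating branch-by-branch loop with two independent counting
-- passes, string.count('U') - string.count('D') (idiomatic; same cost).

-- ===== PORT A =====
def calculate_floor (string : String) : Int :=
  string.toList.foldl
    (fun current_floor move =>
      if move = 'U' then current_floor + 1
      else if move = 'D' then current_floor - 1
      else current_floor) 0

-- ===== PORT B =====
def calculate_floor_alt (string : String) : Int :=
  (PySem.Str.count string "U" : Int) - (PySem.Str.count string "D" : Int)

-- ===== PRECONDITION & SPEC =====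
def Spec_calculate_floor (string : String) (out : Int) : Prop := out = calculate_floor_alt string
instance (string : String) (out : Int) : Decidable (Spec_calculate_floor string out) := by unfold Spec_calculate_floor; infer_instance

-- ===== CLAIM (what is proved, stated in full; the proofs are below) =====
def Claim_equal_calculate_floor : Prop := ∀ (string : String), Dom_calculate_floor string → Spec_calculate_floor string (calculate_floor string)

-- ===== LEMMAS AND PROOFS =====

theorem foldl_ud (l : List Char) (a : Int) :
    l.foldl (fun current_floor move =>
      if move = 'U' then current_floor + 1
      else if move = 'D' then current_floor - 1
      else current_floor) a = a + (l.count 'U' : Int) - (l.count 'D' : Int) := by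
  induction l generalizing a with
  | nil => simp
  | cons x xs ih =>
    simp only [List.foldl_cons, List.count_cons, ih]
    by_cases h : x = 'U' <;> by_cases h2 : x = 'D' <;>
      simp [h, h2] <;> omega

theorem go_single (c : Char) (l : List Char) (fuel acc : Nat) (h : l.length ≤ fuel) :
    PySem.Chars.count.go [c] fuel l acc = acc + l.count c := by
  induction l generalizing fuel acc with
  | nil => cases fuel <;> simp [PySem.Chars.count.go]
  | cons x xs ih =>
    cases fuel with
    | zero => simp at h
    | succ n =>
      simp only [List.length_cons, Nat.succ_le_succ_iff] at h
      rw [PySem.Chars.count.go]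
      simp only [List.isPrefixOf, List.length_cons]
      by_cases hx : x = c
      · simp [hx, ih n _ h]
        omega
      · simp [Ne.symm hx, hx, ih n _ h]

theorem count_single (l : List Char) (c : Char) :
    PySem.Chars.count l [c] = l.count c := by
  simp [PySem.Chars.count]
  rw [go_single c l l.length 0 le_rfl]
  omega

-- ===== VERDICT =====
theorem calculate_floor_spec : Claim_equal_calculate_floor := by
  intro s _
  unfold Spec_calculate_floor calculate_floor calculate_floor_alt
  simp [foldl_ud, count_single]
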